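-- pv_equiv track=rewrite | github.com/jahnito/Workouts_at_Codewars | 6 kyu/ZeroCountInProduct.py | zero_count
-- ===== SOURCE A (Python) =====
-- def zero_count(s):
--
--     def count_zeros(n):
--         if n == 0:
--             return 1
--         c = 0
--         a = 0
--         while a == 0:
--             n //= 10
--             c += 1
--             a = n % 10
--         return c
--
--     result = []
--     zeros = 0
--
--     for a in range(0, s + 1):
--
--         for b in range(0, s + 1):
--             if a > b or sum([a, b]) > s:
--                 continue
--
--             for c in range(0, s + 1):
--                 if b > c or a > c or sum([a, b, c]) != s:
--                     continue
--                 else: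
--                     s_numbers = sum([a, b, c])
--
--                     if s_numbers == s and str(a * b * c).endswith('0'):
--                         if count_zeros(a * b * c) > zeros:
--                             zeros = count_zeros(a * b * c)
--                             result = []
--                             result.append([a, b, c])
--                         elif count_zeros(a * b * c) == zeros:
--                             result.append([a, b, c])
--     return result
-- ===== SOURCE B (Python) =====
-- def zero_count(s):
--
--     def tz(n):
--         if n == 0:
--             return 1
--         c = 0
--         while n % 10 == 0:
--             n //= 10
--             c += 1
--         return c
--
--     triples = [(a, b, s - a - b)
--                for a in range(s + 1)
--                for b in range(a, (s - a) // 2 + 1)]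
--     scored = [(tz(a * b * c), [a, b, c])
--               for a, b, c in triples
--               if (a * b * c) % 10 == 0]
--     if not scored:
--         return []
--     best = max(z for z, _ in scored)
--     return [t for z, t in scored if z == best]
-- ===== Notes on version B (the rewrite author's own statement) =====
-- stated objective: faster
-- what changed: Instead of A's triple nested scan with a best-so-far accumulator, B enumerates the valid triples (a,b,s-a-b) with two comprehensions as a staged pipeline: build the candidate list, score each product's trailing zeros, take max() of the scores, and filter, eliminating the O(s) inner search for c entirely.
import Mathlib
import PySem

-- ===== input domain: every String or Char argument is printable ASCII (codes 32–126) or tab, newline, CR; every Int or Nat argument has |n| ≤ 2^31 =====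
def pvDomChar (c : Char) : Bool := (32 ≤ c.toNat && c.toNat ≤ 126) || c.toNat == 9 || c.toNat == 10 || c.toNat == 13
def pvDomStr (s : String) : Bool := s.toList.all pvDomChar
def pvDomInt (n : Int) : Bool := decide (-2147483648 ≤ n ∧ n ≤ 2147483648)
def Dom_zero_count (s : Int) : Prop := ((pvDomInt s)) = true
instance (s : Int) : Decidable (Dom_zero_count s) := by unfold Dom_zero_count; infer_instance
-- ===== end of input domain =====

-- B replaces A's accumulator-driven triple nested scan by a staged pipeline — enumerate the
-- valid triples (a, b, s-a-b) directly, score them, take the max, filter — (objective: faster,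
-- asymptotic O(s^3) -> O(s^2)).

-- ===== PORT A =====
-- A's inner `while a == 0` loop, fueled: n.natAbs + 1 steps always suffice for the calls A makes
-- (A only calls count_zeros on n = 0 or n > 0 with n % 10 == 0, where Python's loop terminates;
-- on inputs where Python's loop would not terminate the fuel case is unreachable in this file's claims).
def czLoopA : Nat → Int → Int → Int → Int
  | 0, _, c, _ => c
  | fuel+1, n, c, a =>
      if a = 0 then
        czLoopA fuel (PySem.Int.floordiv n 10) (c + 1)
          (PySem.Int.mod (PySem.Int.floordiv n 10) 10)
      else c

def count_zerosA (n : Int) : Int :=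
  if n = 0 then 1 else czLoopA (n.natAbs + 1) n 0 0

def zero_count (s : Int) : List (List Int) :=
  ((PySem.List.pyRange 0 (s+1) 1).foldl (fun st a =>
    (PySem.List.pyRange 0 (s+1) 1).foldl (fun st b =>
      if a > b ∨ [a, b].sum > s then st
      else
        (PySem.List.pyRange 0 (s+1) 1).foldl (fun st c =>
          if b > c ∨ a > c ∨ [a, b, c].sum ≠ s then st
          else
            let s_numbers := [a, b, c].sum
            if s_numbers = s ∧ PySem.Str.endswith (PySem.Int.toStr (a*b*c)) "0" = true then
              if count_zerosA (a*b*c) > st.2 then ([[a, b, c]], count_zerosA (a*b*c))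
              else if count_zerosA (a*b*c) = st.2 then (st.1 ++ [[a, b, c]], st.2)
              else st
            else st) st) st)
    (([] : List (List Int)), (0 : Int))).1

-- ===== PORT B =====
-- B's `while n % 10 == 0` loop (tz in Source B), fueled the same way (n.natAbs + 1 steps suffice for n ≠ 0).
def czLoopB : Nat → Int → Int → Int
  | 0, _, c => c
  | fuel+1, n, c =>
      if PySem.Int.mod n 10 = 0 then czLoopB fuel (PySem.Int.floordiv n 10) (c + 1) else c

def count_zerosB (n : Int) : Int :=
  if n = 0 then 1 else czLoopB (n.natAbs + 1) n 0

def zero_count_alt (s : Int) : List (List Int) :=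
  let triples := (PySem.List.pyRange 0 (s+1) 1).flatMap (fun a =>
    (PySem.List.pyRange a (PySem.Int.floordiv (s - a) 2 + 1) 1).map (fun b => (a, b, s - a - b)))
  let scored := (triples.filter (fun t => PySem.Int.mod (t.1 * t.2.1 * t.2.2) 10 == 0)).map
    (fun t => (count_zerosB (t.1 * t.2.1 * t.2.2), [t.1, t.2.1, t.2.2]))
  match PySem.List.max? (scored.map Prod.fst) (fun z => z) with
  | none => []
  | some best => (scored.filter (fun zt => zt.1 == best)).map Prod.snd

-- ===== PRECONDITION & SPEC =====
def Spec_zero_count (s : Int) (out : List (List Int)) : Prop := out = zero_count_alt s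
instance (s : Int) (out : List (List Int)) : Decidable (Spec_zero_count s out) := by unfold Spec_zero_count; infer_instance

-- ===== CLAIM (what is proved, stated in full; the proofs are below) =====
def Claim_equal_zero_count : Prop := ∀ (s : Int), Dom_zero_count s → Spec_zero_count s (zero_count s)


-- ===== LEMMAS AND PROOFS =====

-- a fold whose step fixes every element of the list is the identity
theorem pvFoldlId {β : Type} (l : List Int) (f : β → Int → β) (st : β)
    (h : ∀ st x, x ∈ l → f st x = st) : l.foldl f st = st := by
  induction l generalizing st with
  | nil => rfl
  | cons y l ih =>
      simp only [List.foldl_cons]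
      rw [h st y (by simp)]
      exact ih st (fun st x hx => h st x (by simp [hx]))

-- a fold whose step acts only at one element of a Nodup list fires at most once
theorem pvFoldlHit {β : Type} (l : List Int) (c0 : Int) (g : β → β) (st : β)
    (hnd : l.Nodup) :
    l.foldl (fun st x => if x = c0 then g st else st) st
      = if c0 ∈ l then g st else st := by
  induction l generalizing st with
  | nil => simp
  | cons y l ih =>
      rcases List.nodup_cons.mp hnd with ⟨hy, hnd'⟩
      by_cases hyc : y = c0
      · subst hyc
        rw [if_pos (show y ∈ y :: l by simp), List.foldl_cons]
        show List.foldl _ (if y = y then g st else st) l = g st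
        rw [if_pos rfl]
        exact pvFoldlId l _ (g st) (fun st x hx =>
          if_neg (fun h : x = y => hy (h ▸ hx)))
      · rw [List.foldl_cons]
        show List.foldl _ (if y = c0 then g st else st) l = _
        rw [if_neg hyc, ih st hnd']
        have hmem : (c0 ∈ y :: l) ↔ c0 ∈ l := by
          simp only [List.mem_cons, or_iff_right_iff_imp]
          intro h; exact absurd h.symm hyc
        simp only [hmem]

-- shrinking a range fold to the window where the step can act
theorem pvFoldlShrink {β : Type} (f : β → Int → β) (lo hi lo' hi' : Int) (st : β)
    (h1 : lo ≤ lo') (h2 : lo' ≤ hi) (h3 : hi' ≤ hi)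
    (hid : ∀ st x, lo ≤ x → x < hi → ¬(lo' ≤ x ∧ x < hi') → f st x = st) :
    (PySem.List.pyRange lo hi 1).foldl f st = (PySem.List.pyRange lo' hi' 1).foldl f st := by
  by_cases hwin : hi' ≤ lo'
  · rw [PySem.List.pyRange_one_eq_nil hwin]
    exact pvFoldlId _ f st (fun st x hx => by
      rcases PySem.List.mem_pyRange_one.mp hx with ⟨ha, hb⟩
      exact hid st x ha hb (by omega))
  · replace hwin : lo' < hi' := by omega
    rw [PySem.List.pyRange_one_append lo lo' hi h1 h2,
        PySem.List.pyRange_one_append lo' hi' hi (le_of_lt hwin) h3,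
        List.foldl_append, List.foldl_append]
    rw [pvFoldlId (PySem.List.pyRange lo lo' 1) f st (fun st x hx => by
      rcases PySem.List.mem_pyRange_one.mp hx with ⟨ha, hb⟩
      exact hid st x ha (by omega) (by omega))]
    exact pvFoldlId _ f _ (fun st x hx => by
      rcases PySem.List.mem_pyRange_one.mp hx with ⟨ha, hb⟩
      exact hid st x (by omega) hb (by omega))

-- one-step unfoldings of the two fueled loops
theorem pvCzLoopAStep (f : Nat) (n c a : Int) :
    czLoopA (f + 1) n c a
      = if a = 0 then
          czLoopA f (PySem.Int.floordiv n 10) (c + 1)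
            (PySem.Int.mod (PySem.Int.floordiv n 10) 10)
        else c := rfl

theorem pvCzLoopBStep (f : Nat) (n c : Int) :
    czLoopB (f + 1) n c
      = if PySem.Int.mod n 10 = 0 then czLoopB f (PySem.Int.floordiv n 10) (c + 1)
        else c := rfl

-- the two fueled trailing-zero loops agree on positive multiples of 10
theorem pvCzLoopEq : ∀ (N : Nat) (n c : Int) (fA fB : Nat),
    n.toNat ≤ N → 0 < n → (10 : Int) ∣ n → n.toNat ≤ fA → n.toNat ≤ fB →
    czLoopA fA n c 0 = czLoopB fB n c := by
  intro N
  induction N with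
  | zero => intro n c fA fB hN h0 _ _ _; omega
  | succ N ih =>
      intro n c fA fB hN h0 hdvd hfA hfB
      obtain ⟨k, rfl⟩ := hdvd
      have hk : 0 < k := by omega
      have hmod : PySem.Int.mod (10 * k) 10 = 0 :=
        (PySem.Int.mod_eq_zero_iff_dvd _ _).mpr ⟨k, rfl⟩
      have hdiv : PySem.Int.floordiv (10 * k) 10 = k := by
        rw [PySem.Int.floordiv_eq_ediv_of_pos (by omega)]
        exact Int.mul_ediv_cancel_left k (by omega)
      obtain ⟨fA', rfl⟩ : ∃ m, fA = m + 1 := ⟨fA - 1, by omega⟩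
      obtain ⟨fB', rfl⟩ : ∃ m, fB = m + 1 := ⟨fB - 1, by omega⟩
      rw [pvCzLoopAStep, pvCzLoopBStep, if_pos rfl, if_pos hmod, hdiv]
      by_cases hk10 : PySem.Int.mod k 10 = 0
      · rw [hk10]
        exact ih k (c + 1) fA' fB' (by omega) hk
          ((PySem.Int.mod_eq_zero_iff_dvd _ _).mp hk10) (by omega) (by omega)
      · have hA : czLoopA fA' k (c + 1) (PySem.Int.mod k 10) = c + 1 := by
          cases fA' with
          | zero => rfl
          | succ m => rw [pvCzLoopAStep, if_neg hk10]
        have hB : czLoopB fB' k (c + 1) = c + 1 := by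
          cases fB' with
          | zero => rfl
          | succ m => rw [pvCzLoopBStep, if_neg hk10]
        rw [hA, hB]

-- A's count_zeros and B's tz agree wherever A calls it (n ≥ 0, last digit 0)
theorem pvCzEq (p : Int) (hp : 0 ≤ p) (hm : PySem.Int.mod p 10 = 0) :
    count_zerosA p = count_zerosB p := by
  by_cases h0 : p = 0
  · subst h0; rfl
  · unfold count_zerosA count_zerosB
    rw [if_neg h0, if_neg h0]
    exact pvCzLoopEq p.toNat p 0 (p.natAbs + 1) (p.natAbs + 1) le_rfl (by omega)
      ((PySem.Int.mod_eq_zero_iff_dvd _ _).mp hm) (by omega) (by omega)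

-- one unfolding step of Nat.toDigitsCore at positive fuel
theorem pvToDigitsCoreStep (f n : Nat) (ds : List Char) :
    Nat.toDigitsCore 10 (f + 1) n ds =
      if n / 10 = 0 then (n % 10).digitChar :: ds
      else Nat.toDigitsCore 10 f (n / 10) ((n % 10).digitChar :: ds) := by
  rw [Nat.toDigitsCore.eq_def]

-- last character of Nat.toDigitsCore, for any fuel > 0
theorem pvToDigitsCoreLast (fuel : Nat) : ∀ (n : Nat) (ds : List Char),
    (Nat.toDigitsCore 10 (fuel + 1) n ds).getLast? = ((n % 10).digitChar :: ds).getLast? := by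
  induction fuel with
  | zero =>
      intro n ds
      rw [pvToDigitsCoreStep]
      split <;> rfl
  | succ f ih =>
      intro n ds
      rw [pvToDigitsCoreStep]
      split
      · rfl
      · rw [ih (n / 10) ((n % 10).digitChar :: ds), List.getLast?_cons_cons]

-- str(p).endswith('0') is exactly p % 10 == 0 on nonnegative p
theorem pvEndswithZero (p : Int) (hp : 0 ≤ p) :
    (PySem.Str.endswith (PySem.Int.toStr p) "0" = true) ↔ PySem.Int.mod p 10 = 0 := by
  rw [PySem.Str.endswith_eq, PySem.Int.toList_toStr]
  have hchars : PySem.Int.toChars p = Nat.toDigits 10 p.toNat := by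
    unfold PySem.Int.toChars
    rw [if_neg (by omega)]
  have htl : ("0" : String).toList = ['0'] := rfl
  rw [hchars, htl, PySem.Chars.endswith_iff]
  have hsuf : ∀ (l : List Char) (ch : Char), [ch] <:+ l ↔ l.getLast? = some ch := by
    intro l ch
    constructor
    · rintro ⟨t, rfl⟩; exact List.getLast?_concat
    · intro h
      obtain ⟨ys, rfl⟩ := List.getLast?_eq_some_iff.mp h
      exact ⟨ys, rfl⟩
  rw [hsuf]
  unfold Nat.toDigits
  rw [pvToDigitsCoreLast p.toNat p.toNat []]
  have hlast : ((p.toNat % 10).digitChar :: ([] : List Char)).getLast? = some ((p.toNat % 10).digitChar) := rfl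
  rw [hlast]
  have hmodcast : PySem.Int.mod p 10 = ((p.toNat % 10 : Nat) : Int) := by
    conv_lhs => rw [← Int.toNat_of_nonneg hp]
    exact_mod_cast PySem.Int.mod_natCast p.toNat 10
  rw [hmodcast]
  have hb : p.toNat % 10 < 10 := by omega
  constructor
  · intro h
    have hd : (p.toNat % 10).digitChar = '0' := by injection h
    interval_cases h10 : p.toNat % 10 <;> simp_all [Nat.digitChar]
  · intro h
    have : p.toNat % 10 = 0 := by omega
    rw [this]
    rfl

-- the best-so-far update both programs perform on a scored triple
def pvStep (st : List (List Int) × Int) (zt : Int × List Int) : List (List Int) × Int :=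
  if zt.1 > st.2 then ([zt.2], zt.1)
  else if zt.1 = st.2 then (st.1 ++ [zt.2], st.2)
  else st

-- the running maximum of the scores, as the accumulator fold computes it
def pvMax (l : List (Int × List Int)) : Int := l.foldl (fun m zt => max m zt.1) 0

-- the common per-(a,b) body A executes on a valid triple (a, b, s-a-b)
def pvBody (s a b : Int) (st : List (List Int) × Int) : List (List Int) × Int :=
  if PySem.Str.endswith (PySem.Int.toStr (a*b*(s-a-b))) "0" = true then
    if count_zerosA (a*b*(s-a-b)) > st.2 then ([[a, b, s-a-b]], count_zerosA (a*b*(s-a-b)))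
    else if count_zerosA (a*b*(s-a-b)) = st.2 then (st.1 ++ [[a, b, s-a-b]], st.2)
    else st
  else st

-- collapsing A's inner c-loop: only c = s - a - b can act
theorem pvInnerCollapse (s a b : Int) (ha0 : 0 ≤ a) (hab : a ≤ b) (habs : a + b ≤ s)
    (st : List (List Int) × Int) :
    (PySem.List.pyRange 0 (s+1) 1).foldl (fun st c =>
      if b > c ∨ a > c ∨ ¬(a + (b + c) = s) then st
      else
        if a + (b + c) = s ∧ PySem.Str.endswith (PySem.Int.toStr (a*b*c)) "0" = true then
          if count_zerosA (a*b*c) > st.2 then ([[a, b, c]], count_zerosA (a*b*c))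
          else if count_zerosA (a*b*c) = st.2 then (st.1 ++ [[a, b, c]], st.2)
          else st
        else st) st
    = if b ≤ s - a - b then pvBody s a b st else st := by
  rw [PySem.List.foldl_congr_mem _ _
        (fun st x => if x = s - a - b then (if b ≤ s - a - b then pvBody s a b st else st) else st)
        st ?_]
  · rw [pvFoldlHit _ _ _ _ (PySem.List.nodup_pyRange_one 0 (s+1)),
        if_pos (PySem.List.mem_pyRange_one.mpr ⟨by omega, by omega⟩)]
  · intro acc x hx
    beta_reduce
    by_cases hxc : x = s - a - b
    · subst hxc
      rw [if_pos rfl]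
      by_cases hb : b ≤ s - a - b
      · rw [if_neg (by omega), if_pos hb,
            if_congr (and_iff_right (by omega : a + (b + (s - a - b)) = s)) rfl rfl]
        rfl
      · rw [if_pos (by omega), if_neg hb]
    · rw [if_pos (by omega), if_neg hxc]

-- A's b-loop for one a, reduced to the per-scored-triple update over the window [a, (s-a)//2]
theorem pvInnerEq (s a : Int) (ha0 : 0 ≤ a) (has : a ≤ s) (st : List (List Int) × Int) :
    (PySem.List.pyRange 0 (s+1) 1).foldl (fun st b =>
      if a > b ∨ a + (b + 0) > s then st
      else
        (PySem.List.pyRange 0 (s+1) 1).foldl (fun st c =>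
          if b > c ∨ a > c ∨ ¬(a + (b + (c + 0)) = s) then st
          else
            let s_numbers := a + (b + (c + 0))
            if s_numbers = s ∧ PySem.Str.endswith (PySem.Int.toStr (a*b*c)) "0" = true then
              if count_zerosA (a*b*c) > st.2 then ([[a, b, c]], count_zerosA (a*b*c))
              else if count_zerosA (a*b*c) = st.2 then (st.1 ++ [[a, b, c]], st.2)
              else st
            else st) st) st
    = (PySem.List.pyRange a (PySem.Int.floordiv (s - a) 2 + 1) 1).foldl (fun st b =>
        if PySem.Int.mod (a * b * (s - a - b)) 10 = 0 then
          pvStep st (count_zerosB (a * b * (s - a - b)), [a, b, s - a - b])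
        else st) st := by
  have hM2 : (0 : Int) < 2 := by omega
  -- step 1: collapse the c-loop, yielding one simplified b-step on the whole range
  rw [PySem.List.foldl_congr_mem _ _
        (fun st b => if a > b ∨ a + b > s then st
                     else if b ≤ s - a - b then pvBody s a b st else st) st ?_]
  · -- step 2: shrink the b-range to the window [a, (s-a)//2 + 1)
    rw [pvFoldlShrink _ 0 (s+1) a (PySem.Int.floordiv (s - a) 2 + 1) st ha0 (by omega)
          (by have := (PySem.Int.floordiv_lt_iff_lt_mul (a := s - a) (q := s + 1) hM2).mpr
                (by omega)
              omega) ?_]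
    · -- step 3: inside the window the simplified step is the scored-triple update
      refine PySem.List.foldl_congr_mem _ _ _ _ ?_
      intro acc b hb
      beta_reduce
      rcases PySem.List.mem_pyRange_one.mp hb with ⟨hab, hbM⟩
      have h2b : b * 2 ≤ s - a :=
        (PySem.Int.le_floordiv_iff_mul_le hM2).mp (by omega)
      have hp : 0 ≤ a * b * (s - a - b) :=
        mul_nonneg (mul_nonneg ha0 (by omega)) (by omega)
      rw [if_neg (by omega), if_pos (by omega)]
      show pvBody s a b acc = _
      unfold pvBody pvStep
      by_cases hm : PySem.Int.mod (a * b * (s - a - b)) 10 = 0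
      · rw [if_pos ((pvEndswithZero _ hp).mpr hm), if_pos hm, pvCzEq _ hp hm]
      · rw [if_neg (fun h => hm ((pvEndswithZero _ hp).mp h)), if_neg hm]
    · -- the simplified step fixes the state outside the window
      intro acc x hx0 hxs hxw
      by_cases hg : a > x ∨ a + x > s
      · rw [if_pos hg]
      · rw [if_neg hg]
        have : ¬ x ≤ s - a - x := by
          have hMx : PySem.Int.floordiv (s - a) 2 < x := by omega
          have := (PySem.Int.floordiv_lt_iff_lt_mul (a := s - a) (q := x) hM2).mp hMx
          omega
        rw [if_neg this]
  · -- step 1's per-b obligation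
    intro acc b _
    beta_reduce
    by_cases hg : a > b ∨ a + (b + 0) > s
    · rw [if_pos hg, if_pos (by omega)]
    · rw [if_neg hg, if_neg (by omega : ¬(a > b ∨ a + b > s))]
      simp only [add_zero]
      exact pvInnerCollapse s a b ha0 (by omega) (by omega) acc

-- a fold over a flatMap is the nested fold
theorem pvFoldlFlatMap {α β γ : Type} (l : List α) (f : α → List β) (g : γ → β → γ) (st : γ) :
    (l.flatMap f).foldl g st = l.foldl (fun st a => (f a).foldl g st) st := by
  induction l generalizing st with
  | nil => rfl
  | cons a l ih => simp [List.flatMap_cons, List.foldl_append, ih]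

-- czLoopB never decreases its counter
theorem pvCzLoopBGe : ∀ (fuel : Nat) (n c : Int), c ≤ czLoopB fuel n c := by
  intro fuel
  induction fuel with
  | zero => intro n c; exact le_refl c
  | succ f ih =>
      intro n c
      rw [pvCzLoopBStep]
      split
      · exact le_trans (by omega) (ih (PySem.Int.floordiv n 10) (c + 1))
      · exact le_refl c

-- every score B assigns to a kept triple is positive
theorem pvCzBPos (p : Int) (hm : PySem.Int.mod p 10 = 0) : 0 < count_zerosB p := by
  by_cases h0 : p = 0
  · subst h0; decide
  · unfold count_zerosB
    rw [if_neg h0]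
    obtain ⟨f, hf⟩ : ∃ m, p.natAbs + 1 = m + 1 := ⟨p.natAbs, rfl⟩
    rw [hf, pvCzLoopBStep, if_pos hm]
    exact lt_of_lt_of_le (by omega) (pvCzLoopBGe f _ 1)

-- pvMax bounds every score in the list
theorem pvLeMax (l : List (Int × List Int)) : ∀ zt ∈ l, zt.1 ≤ pvMax l := by
  intro zt hzt
  exact (PySem.List.le_foldl_max_int l Prod.fst 0).2 zt hzt

-- the accumulator fold computes exactly "filter by the maximal score"
theorem pvFoldMax (l : List (Int × List Int)) (hpos : ∀ zt ∈ l, 0 < zt.1) :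
    l.foldl pvStep (([] : List (List Int)), (0 : Int))
      = ((l.filter (fun zt => zt.1 == pvMax l)).map Prod.snd, pvMax l) := by
  induction l using List.reverseRecOn with
  | nil => rfl
  | append_singleton l x ih =>
      have hposl : ∀ zt ∈ l, 0 < zt.1 := fun zt h => hpos zt (by simp [h])
      have hMapp : pvMax (l ++ [x]) = max (pvMax l) x.1 := by
        simp [pvMax, List.foldl_append]
      rw [List.foldl_append, ih hposl, List.foldl_cons, List.foldl_nil, hMapp,
          List.filter_append]
      rcases lt_trichotomy (pvMax l) x.1 with hlt | heq | hgt
      · have hmax : max (pvMax l) x.1 = x.1 := max_eq_right (le_of_lt hlt)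
        rw [hmax]
        have hfl : l.filter (fun zt => zt.1 == x.1) = [] := by
          rw [List.filter_eq_nil_iff]
          intro zt hzt
          have := pvLeMax l zt hzt
          simp only [beq_iff_eq]
          omega
        have hfx : List.filter (fun zt => zt.1 == x.1) [x] = [x] := by
          simp
        rw [hfl, hfx, pvStep]
        simp [hlt]
      · have hmax : max (pvMax l) x.1 = pvMax l := by omega
        rw [hmax, pvStep]
        have hx : List.filter (fun zt => zt.1 == pvMax l) [x] = [x] := by
          simp [heq]
        rw [hx]
        simp only [List.map_append, List.map_cons, List.map_nil]
        rw [if_neg (by simp; omega), if_pos heq.symm]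
      · have hmax : max (pvMax l) x.1 = pvMax l := by omega
        rw [hmax, pvStep]
        have hx : List.filter (fun zt => zt.1 == pvMax l) [x] = [] := by
          simp; omega
        rw [hx]
        simp only [List.append_nil]
        rw [if_neg (by omega), if_neg (by omega)]

-- a conditional fold is a fold over the filtered list
theorem pvFoldlIfFilter {α β : Type} (l : List α) (p : α → Bool) (f : β → α → β) (st : β) :
    l.foldl (fun st x => if p x then f st x else st) st = (l.filter p).foldl f st := by
  induction l generalizing st with
  | nil => rfl
  | cons a l ih => by_cases h : p a <;> simp [h, ih]

-- "filter by the running max" is the staged max?-then-filter pipeline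
theorem pvMaxMatch (l : List (Int × List Int)) (hpos : ∀ zt ∈ l, 0 < zt.1) :
    (((l.filter (fun zt => zt.1 == pvMax l)).map Prod.snd, pvMax l) : List (List Int) × Int).1
      = match PySem.List.max? (l.map Prod.fst) (fun z => z) with
        | none => []
        | some best => (l.filter (fun zt => zt.1 == best)).map Prod.snd := by
  cases l with
  | nil => rfl
  | cons x tl =>
      have hmap : (x :: tl).map Prod.fst = x.1 :: tl.map Prod.fst := rfl
      rw [hmap, PySem.List.max?_id_cons]
      have hx1 : 0 < x.1 := hpos x (List.mem_cons_self ..)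
      have hMval : (tl.map Prod.fst).foldl max x.1 = pvMax (x :: tl) := by
        show (tl.map Prod.fst).foldl max x.1 = tl.foldl (fun m zt => max m zt.1) (max 0 x.1)
        rw [List.foldl_map]
        congr 1
        omega
      rw [hMval]

-- A's whole scan, reduced to the accumulator fold over the scored triples of B's pipeline
theorem pvAeqFold (s : Int) :
    zero_count s
      = (((PySem.List.pyRange 0 (s+1) 1).flatMap (fun a =>
            (PySem.List.pyRange a (PySem.Int.floordiv (s - a) 2 + 1) 1).map
              (fun b => (a, b, s - a - b)))).foldl
          (fun st (t : Int × Int × Int) =>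
            if PySem.Int.mod (t.1 * t.2.1 * t.2.2) 10 = 0 then
              pvStep st (count_zerosB (t.1 * t.2.1 * t.2.2), [t.1, t.2.1, t.2.2])
            else st)
          (([] : List (List Int)), (0 : Int))).1 := by
  unfold zero_count
  simp only [List.sum_cons, List.sum_nil, add_zero]
  refine congrArg Prod.fst ?_
  rw [pvFoldlFlatMap]
  refine PySem.List.foldl_congr_mem _ _ _ _ ?_
  intro st a ha
  rcases PySem.List.mem_pyRange_one.mp ha with ⟨ha0, has⟩
  rw [List.foldl_map]
  have h := pvInnerEq s a ha0 (by omega) st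
  simp only [add_zero] at h ⊢
  exact h

-- ===== VERDICT (by name: the statement is the Claim_ definition above) =====
theorem zero_count_spec : Claim_equal_zero_count := by
  intro s _
  show zero_count s = zero_count_alt s
  rw [pvAeqFold s]
  simp only [zero_count_alt]
  set T := (PySem.List.pyRange 0 (s+1) 1).flatMap (fun a =>
    (PySem.List.pyRange a (PySem.Int.floordiv (s - a) 2 + 1) 1).map
      (fun b => (a, b, s - a - b))) with hT
  set scored := (T.filter (fun t => PySem.Int.mod (t.1 * t.2.1 * t.2.2) 10 == 0)).map
    (fun t => (count_zerosB (t.1 * t.2.1 * t.2.2), [t.1, t.2.1, t.2.2])) with hscored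
  -- A's accumulator fold over T = the accumulator fold over scored
  have hfold :
      (T.foldl (fun st (t : Int × Int × Int) =>
          if PySem.Int.mod (t.1 * t.2.1 * t.2.2) 10 = 0 then
            pvStep st (count_zerosB (t.1 * t.2.1 * t.2.2), [t.1, t.2.1, t.2.2])
          else st) (([] : List (List Int)), (0 : Int)))
        = scored.foldl pvStep (([] : List (List Int)), (0 : Int)) := by
    rw [hscored, List.foldl_map, ← pvFoldlIfFilter]
    refine PySem.List.foldl_congr_mem _ _ _ _ ?_
    intro st t _
    simp only [beq_iff_eq]
  rw [hfold]
  -- every score in scored is positive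
  have hpos : ∀ zt ∈ scored, 0 < zt.1 := by
    intro zt hzt
    rw [hscored] at hzt
    rcases List.mem_map.mp hzt with ⟨t, ht, rfl⟩
    have hm : PySem.Int.mod (t.1 * t.2.1 * t.2.2) 10 = 0 := by
      have := List.of_mem_filter ht
      simpa using this
    exact pvCzBPos _ hm
  rw [pvFoldMax scored hpos]
  exact pvMaxMatch scored hpos
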